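-- pv_equiv track=rewrite | github.com/vini-muchulski/Studies | Py/adventure_code/day03/da03-1.py | find_letra
-- ===== SOURCE A (Python) =====
-- def find_letra(moc1):
--
--     tamanho = int(len(moc1)/2)
--     moc2 = moc1[tamanho:]
--
--     letra_repetida =""
--     for i in range(0,len(moc1)):
--
--         for l in range(0,len(moc2)):
--
--             if(moc1[i] == moc2[l]):
--
--                 letra_repetida = moc1[i]
--                 return letra_repetida
-- ===== SOURCE B (Python) =====
-- def find_letra(moc1):
--     # Index moc1 once: each character -> its first position.
--     first_idx = {}
--     for i, ch in enumerate(moc1):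
--         if ch not in first_idx:
--             first_idx[ch] = i
--     moc2 = moc1[len(moc1) // 2:]
--     # The answer is the character of moc1 with the smallest first position
--     # among the characters occurring in the second half.
--     best = None
--     for ch in moc2:
--         j = first_idx[ch]
--         if best is None or j < best:
--             best = j
--     return moc1[best] if best is not None else None
-- ===== Notes on version B (the rewrite author's own statement) =====
-- stated objective: faster
-- what changed: Replaces A's nested loops (for each moc1 char, scan the second half char by char) with a single pass building a char->first-index dict over moc1, then one scan of the second half taking the minimum index via dict lookup.
import Mathlib
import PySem

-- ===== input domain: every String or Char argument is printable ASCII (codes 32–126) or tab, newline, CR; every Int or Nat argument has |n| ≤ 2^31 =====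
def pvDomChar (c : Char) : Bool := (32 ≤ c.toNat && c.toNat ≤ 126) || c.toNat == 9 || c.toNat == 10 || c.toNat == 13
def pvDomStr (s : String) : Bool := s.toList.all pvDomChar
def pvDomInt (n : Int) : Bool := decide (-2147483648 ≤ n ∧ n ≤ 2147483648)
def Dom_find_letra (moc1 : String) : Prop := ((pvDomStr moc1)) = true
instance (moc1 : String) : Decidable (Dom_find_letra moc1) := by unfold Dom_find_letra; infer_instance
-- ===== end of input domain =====

-- B replaces A's nested membership scan by a one-pass first-index table of moc1,
-- scanned against the second half keeping the minimum index (objective: faster, O(n) vs O(n^2)).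

-- ===== PORT A =====
-- inner loop 'for l in range(0,len(moc2)): if moc1[i] == moc2[l]: … return'
-- (the return value is moc1[i] itself, so the inner loop only decides a match exists)
def pvInnerA (c : Char) : List Char → Bool
  | [] => false
  | d :: ds => if c = d then true else pvInnerA c ds

-- outer loop 'for i in range(0,len(moc1))' with early return of moc1[i]
def pvOuterA (m2 : List Char) : List Char → Option String
  | [] => none
  | c :: cs => if pvInnerA c m2 then some (String.mk [c]) else pvOuterA m2 cs

def find_letra (moc1 : String) : Option String :=
  let cs := moc1.toList
  let tamanho := cs.length / 2      -- int(len(moc1)/2): len ≥ 0, so truncation = Nat division, exact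
  let moc2 := cs.drop tamanho       -- moc1[tamanho:] with 0 ≤ tamanho: List.drop is exact here
  pvOuterA moc2 cs

-- ===== PORT B =====
-- 'for i, ch in enumerate(moc1): if ch not in first_idx: first_idx[ch] = i'
-- (indices produced by enumerate are nonnegative, so Nat carries them exactly)
def pvBuildIdx : List Char → Nat → PySem.Dict Char Nat → PySem.Dict Char Nat
  | [], _, d => d
  | c :: cs, i, d => pvBuildIdx cs (i + 1) (if d.contains c then d else d.insert c i)

-- 'for ch in moc2: j = first_idx[ch]; if best is None or j < best: best = j'
-- (first_idx[ch] never raises: every character of moc2 occurs in moc1, so getD's default is unreachable)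
def pvScanMin (d : PySem.Dict Char Nat) : List Char → Option Nat → Option Nat
  | [], best => best
  | c :: cs, best =>
      pvScanMin d cs (match best with
        | none => some (d.getD c 0)
        | some b => if d.getD c 0 < b then some (d.getD c 0) else some b)

def find_letra_alt (moc1 : String) : Option String :=
  let cs := moc1.toList
  let d := pvBuildIdx cs 0 PySem.Dict.empty
  let moc2 := cs.drop (cs.length / 2)
  match pvScanMin d moc2 none with
  | none => none
  | some j => (cs[j]?).map (fun c => String.mk [c])  -- moc1[best]: best is always a valid index

-- ===== PRECONDITION & SPEC =====
def Spec_find_letra (moc1 : String) (out : Option String) : Prop := out = find_letra_alt moc1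
instance (moc1 : String) (out : Option String) : Decidable (Spec_find_letra moc1 out) := by unfold Spec_find_letra; infer_instance

-- ===== CLAIM (what is proved, stated in full; the proofs are below) =====
def Claim_equal_find_letra : Prop := ∀ (moc1 : String), Dom_find_letra moc1 → Spec_find_letra moc1 (find_letra moc1)

-- ===== LEMMAS AND PROOFS =====

lemma pvInnerA_eq (c : Char) (m2 : List Char) : pvInnerA c m2 = decide (c ∈ m2) := by
  induction m2 with
  | nil => simp [pvInnerA]
  | cons d ds ih => by_cases h : c = d <;> simp [pvInnerA, h, ih]

lemma pvOuterA_eq (m2 cs : List Char) :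
    pvOuterA m2 cs = (cs.find? (fun c => decide (c ∈ m2))).map (fun c => String.mk [c]) := by
  induction cs with
  | nil => simp [pvOuterA]
  | cons c cs ih =>
    rw [pvOuterA, pvInnerA_eq, List.find?_cons]
    by_cases h : c ∈ m2 <;> simp [h, ih]

lemma pvBuildIdx_get? (cs : List Char) : ∀ (i : Nat) (d : PySem.Dict Char Nat) (c : Char),
    (pvBuildIdx cs i d).get? c =
      match d.get? c with
      | some v => some v
      | none => if c ∈ cs then some (i + List.idxOf c cs) else none := by
  induction cs with
  | nil =>
    intro i d c
    cases h : d.get? c <;> simp [pvBuildIdx, h]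
  | cons hd cs ih =>
    intro i d c
    rw [pvBuildIdx, ih]
    by_cases hcon : d.contains hd = true
    · rw [if_pos hcon]
      cases h : d.get? c with
      | some v => simp
      | none =>
        by_cases hc : c = hd
        · subst hc
          rw [PySem.Dict.contains_eq_isSome_get?, h] at hcon
          simp at hcon
        · have : List.idxOf c (hd :: cs) = List.idxOf c cs + 1 := by
            simp [List.idxOf_cons, (by simpa using Ne.symm hc : (hd == c) = false)]
          simp only [List.mem_cons, this]
          have hne : ¬ (c = hd ∨ c ∈ cs) ↔ ¬ (c ∈ cs) := by tauto
          by_cases hmem : c ∈ cs <;> simp [hmem, hc] <;> omega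
    · rw [if_neg hcon]
      by_cases hc : c = hd
      · subst hc
        rw [PySem.Dict.get?_insert]
        have h : d.get? c = none := by
          rw [PySem.Dict.contains_eq_isSome_get?] at hcon
          cases h : d.get? c <;> simp [h] at hcon ⊢
        simp [h, List.idxOf_cons]
      · rw [PySem.Dict.get?_insert, if_neg hc]
        cases h : d.get? c with
        | some v => simp
        | none =>
          have : List.idxOf c (hd :: cs) = List.idxOf c cs + 1 := by
            simp [List.idxOf_cons, (by simpa using Ne.symm hc : (hd == c) = false)]
          simp only [List.mem_cons, this]
          by_cases hmem : c ∈ cs <;> simp [hmem, hc] <;> omega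

lemma pvScanMin_eq (d : PySem.Dict Char Nat) : ∀ (m2 : List Char) (best : Option Nat),
    pvScanMin d m2 best = (best.toList ++ m2.map (fun c => d.getD c 0)).min? := by
  intro m2
  induction m2 with
  | nil => intro best; cases best <;> simp [pvScanMin, List.min?_cons']
  | cons c m2 ih =>
    intro best
    simp only [pvScanMin]
    rw [ih]
    cases best with
    | none => simp
    | some b =>
      have h : (if d.getD c 0 < b then some (d.getD c 0) else some b) = some (min b (d.getD c 0)) := by
        rcases Nat.lt_or_ge (d.getD c 0) b with h | h <;> simp [h, Nat.min_def] <;> omega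
      dsimp only
      rw [h]
      simp only [Option.toList_some, List.singleton_append, List.cons_append, List.map_cons,
        List.nil_append, List.min?_cons', List.foldl_cons]

lemma pv_idxOf_getElem_le (l : List Char) : ∀ (i : Nat) (h : i < l.length), List.idxOf (l[i]) l ≤ i := by
  induction l with
  | nil => intro i h; simp at h
  | cons x xs ih =>
    intro i h
    cases i with
    | zero => simp [List.idxOf_cons]
    | succ i =>
      have h' : i < xs.length := by simpa using h
      have := ih i h'
      simp only [List.getElem_cons_succ, List.idxOf_cons]
      cases hbeq : (x == xs[i]) <;> simp [hbeq] <;> omega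

lemma pv_find?_of_getElem {α : Type} (p : α → Bool) (l : List α) : ∀ (k : Nat) (hk : k < l.length),
    p (l[k]) = true → (∀ i (h : i < l.length), i < k → p l[i] = false) →
    l.find? p = some (l[k]) := by
  induction l with
  | nil => intro k hk; simp at hk
  | cons x xs ih =>
    intro k hk h1 h2
    cases k with
    | zero => simp_all [List.find?_cons]
    | succ k =>
      have hx : p x = false := h2 0 (by simp) (Nat.succ_pos k)
      have hk' : k < xs.length := by simpa using hk
      rw [List.find?_cons, hx]
      simp only [List.getElem_cons_succ] at h1 ⊢
      exact ih k hk' h1 (fun i h hi => h2 (i + 1) (by simpa using h) (by omega))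

theorem pv_main (moc1 : String) : find_letra moc1 = find_letra_alt moc1 := by
  unfold find_letra find_letra_alt
  dsimp only
  set cs := moc1.toList with hcs
  set m2 := cs.drop (cs.length / 2) with hm2
  rw [pvOuterA_eq, pvScanMin_eq]
  have hmap : m2.map (fun c => (pvBuildIdx cs 0 PySem.Dict.empty).getD c 0)
      = m2.map (fun c => List.idxOf c cs) := by
    apply List.map_congr_left
    intro c hc
    have hmem : c ∈ cs := List.mem_of_mem_drop (hm2 ▸ hc)
    rw [PySem.Dict.getD_eq_get?_getD, pvBuildIdx_get?]
    simp [hmem]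
  rw [hmap]
  simp only [Option.toList_none, List.nil_append]
  cases hmin : (m2.map (fun c => List.idxOf c cs)).min? with
  | none =>
    have hm2nil : m2 = [] := by
      rcases List.min?_eq_none_iff.mp hmin with h
      exact List.map_eq_nil_iff.mp h
    have : cs.find? (fun c => decide (c ∈ m2)) = none := by
      rw [List.find?_eq_none]; intro x _; simp [hm2nil]
    simp [this]
  | some k =>
    rw [List.min?_eq_some_iff] at hmin
    obtain ⟨hkmem, hkmin⟩ := hmin
    obtain ⟨a, ham2, hak⟩ := List.mem_map.mp hkmem
    subst hak
    have hacs : a ∈ cs := List.mem_of_mem_drop (hm2 ▸ ham2)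
    have hklt : List.idxOf a cs < cs.length := List.idxOf_lt_length_iff.mpr hacs
    have hga : cs[List.idxOf a cs] = a := List.getElem_idxOf hklt
    have hfind : cs.find? (fun c => decide (c ∈ m2)) = some (cs[List.idxOf a cs]) := by
      apply pv_find?_of_getElem _ _ _ hklt
      · simp [hga, ham2]
      · intro i hi hik
        by_contra hmemb
        simp only [Bool.not_eq_false, decide_eq_true_eq] at hmemb
        have h1 : List.idxOf a cs ≤ List.idxOf cs[i] cs :=
          hkmin _ (List.mem_map.mpr ⟨cs[i], hmemb, rfl⟩)
        have h2 : List.idxOf cs[i] cs ≤ i := pv_idxOf_getElem_le cs i hi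
        omega
    rw [hfind]
    simp [List.getElem?_eq_getElem hklt]

-- ===== VERDICT (by name: the statement is the Claim_ definition above) =====
theorem find_letra_spec : Claim_equal_find_letra := by
  intro moc1 _
  unfold Spec_find_letra
  exact pv_main moc1
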